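-- pv_equiv track=rewrite | github.com/rondayan42/echoframe | echoframe/student_driven_snake.py | _determine_echo_level
-- ===== SOURCE A (Python) =====
-- def _determine_echo_level(files):
--     """Determine which echo level the student is at based on their code."""
--     echo_level = 0
--
--     # Check for constants definition (Echo 1)
--     for _, code in files.items():
--         if 'GRID_WIDTH' in code and 'GRID_HEIGHT' in code and 'CELL_SIZE' in code:
--             echo_level = max(echo_level, 1)
--
--     # Check for game loop (Echo 2)
--     for _, code in files.items():
--         if 'pygame.init()' in code and 'while' in code and 'pygame.display.flip()' in code:
--             echo_level = max(echo_level, 2)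
--
--     # Check for Snake class (Echo 3)
--     for _, code in files.items():
--         if 'class Snake' in code:
--             echo_level = max(echo_level, 3)
--
--     # Check for draw method (Echo 4)
--     for _, code in files.items():
--         if 'class Snake' in code and 'def draw' in code and 'pygame.draw.rect' in code:
--             echo_level = max(echo_level, 4)
--
--     # Check for Food class (Echo 5)
--     for _, code in files.items():
--         if 'class Food' in code:
--             echo_level = max(echo_level, 5)
--
--     # Check for snake growth (Echo 6)
--     for _, code in files.items():
--         if ('grow' in code or 'eat' in code) and 'food' in code.lower():
--             echo_level = max(echo_level, 6)
--
--     # Check for input handling (Echo 7)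
--     for _, code in files.items():
--         if 'pygame.K_UP' in code or 'pygame.K_DOWN' in code:
--             echo_level = max(echo_level, 7)
--
--     # Check for collision detection (Echo 8)
--     for _, code in files.items():
--         if ('collision' in code or 'collide' in code) and ('wall' in code or 'self' in code):
--             echo_level = max(echo_level, 8)
--
--     # Check for game over (Echo 9)
--     for _, code in files.items():
--         if 'game over' in code.lower() or 'gameover' in code.lower() or 'restart' in code.lower():
--             echo_level = max(echo_level, 9)
--
--     return echo_level
-- ===== SOURCE B (Python) =====
-- def _determine_echo_level(files):
--     """Determine which echo level the student is at based on their code."""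
--     echo_level = 0
--     for code in files.values():
--         checks = [
--             (1, 'GRID_WIDTH' in code and 'GRID_HEIGHT' in code and 'CELL_SIZE' in code),
--             (2, 'pygame.init()' in code and 'while' in code and 'pygame.display.flip()' in code),
--             (3, 'class Snake' in code),
--             (4, 'class Snake' in code and 'def draw' in code and 'pygame.draw.rect' in code),
--             (5, 'class Food' in code),
--             (6, ('grow' in code or 'eat' in code) and 'food' in code.lower()),
--             (7, 'pygame.K_UP' in code or 'pygame.K_DOWN' in code),
--             (8, ('collision' in code or 'collide' in code) and ('wall' in code or 'self' in code)),
--             (9, 'game over' in code.lower() or 'gameover' in code.lower() or 'restart' in code.lower()),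
--         ]
--         lvl = 0
--         for k, hit in checks:
--             if hit:
--                 lvl = max(lvl, k)
--         echo_level = max(echo_level, lvl)
--     return echo_level
-- ===== Notes on version B (the rewrite author's own statement) =====
-- stated objective: alternative
-- what changed: Replaces A's nine separate passes over the files dict with a single traversal that evaluates all nine level conditions per file and keeps a running maximum.
import Mathlib
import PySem

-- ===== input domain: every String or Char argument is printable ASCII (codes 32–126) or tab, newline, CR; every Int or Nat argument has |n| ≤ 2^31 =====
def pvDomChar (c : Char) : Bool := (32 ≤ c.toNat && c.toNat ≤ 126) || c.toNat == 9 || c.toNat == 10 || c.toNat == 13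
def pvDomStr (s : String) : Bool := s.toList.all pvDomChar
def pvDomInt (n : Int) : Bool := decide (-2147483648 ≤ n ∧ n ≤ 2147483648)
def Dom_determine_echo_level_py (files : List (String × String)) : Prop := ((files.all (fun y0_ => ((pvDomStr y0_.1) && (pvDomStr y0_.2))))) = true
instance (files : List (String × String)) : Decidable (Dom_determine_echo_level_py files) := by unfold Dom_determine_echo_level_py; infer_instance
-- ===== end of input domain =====

-- B fuses A's nine passes over the files into ONE traversal that rates each file and keeps a running maximum (objective: alternative single-pass decomposition).
-- The nine level conditions appear verbatim in both Pythons; they are shared helpers here.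

def echoCond1 (code : String) : Bool :=
  PySem.Str.isIn "GRID_WIDTH" code && PySem.Str.isIn "GRID_HEIGHT" code && PySem.Str.isIn "CELL_SIZE" code
def echoCond2 (code : String) : Bool :=
  PySem.Str.isIn "pygame.init()" code && PySem.Str.isIn "while" code && PySem.Str.isIn "pygame.display.flip()" code
def echoCond3 (code : String) : Bool := PySem.Str.isIn "class Snake" code
def echoCond4 (code : String) : Bool :=
  PySem.Str.isIn "class Snake" code && PySem.Str.isIn "def draw" code && PySem.Str.isIn "pygame.draw.rect" code
def echoCond5 (code : String) : Bool := PySem.Str.isIn "class Food" code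
def echoCond6 (code : String) : Bool :=
  (PySem.Str.isIn "grow" code || PySem.Str.isIn "eat" code) && PySem.Str.isIn "food" (PySem.Str.lower code)
def echoCond7 (code : String) : Bool :=
  PySem.Str.isIn "pygame.K_UP" code || PySem.Str.isIn "pygame.K_DOWN" code
def echoCond8 (code : String) : Bool :=
  (PySem.Str.isIn "collision" code || PySem.Str.isIn "collide" code) &&
  (PySem.Str.isIn "wall" code || PySem.Str.isIn "self" code)
def echoCond9 (code : String) : Bool :=
  PySem.Str.isIn "game over" (PySem.Str.lower code) || PySem.Str.isIn "gameover" (PySem.Str.lower code) ||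
  PySem.Str.isIn "restart" (PySem.Str.lower code)

-- ===== PORT A =====  (nine separate passes over the files, exactly as the Python)
def determine_echo_level_py (files : List (String × String)) : Int :=
  let e0 : Int := 0
  let e1 := files.foldl (fun e p => if echoCond1 p.2 then max e 1 else e) e0
  let e2 := files.foldl (fun e p => if echoCond2 p.2 then max e 2 else e) e1
  let e3 := files.foldl (fun e p => if echoCond3 p.2 then max e 3 else e) e2
  let e4 := files.foldl (fun e p => if echoCond4 p.2 then max e 4 else e) e3
  let e5 := files.foldl (fun e p => if echoCond5 p.2 then max e 5 else e) e4
  let e6 := files.foldl (fun e p => if echoCond6 p.2 then max e 6 else e) e5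
  let e7 := files.foldl (fun e p => if echoCond7 p.2 then max e 7 else e) e6
  let e8 := files.foldl (fun e p => if echoCond8 p.2 then max e 8 else e) e7
  files.foldl (fun e p => if echoCond9 p.2 then max e 9 else e) e8

-- ===== PORT B =====  (single pass: rate each file, keep the running maximum)
def echoChecks (code : String) : List (Int × Bool) :=
  [(1, echoCond1 code), (2, echoCond2 code), (3, echoCond3 code), (4, echoCond4 code),
   (5, echoCond5 code), (6, echoCond6 code), (7, echoCond7 code), (8, echoCond8 code),
   (9, echoCond9 code)]

def echoLevelOf (code : String) : Int :=
  (echoChecks code).foldl (fun l kc => if kc.2 then max l kc.1 else l) 0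

def determine_echo_level_py_alt (files : List (String × String)) : Int :=
  files.foldl (fun e p => max e (echoLevelOf p.2)) 0

-- ===== PRECONDITION & SPEC =====
-- Pre_ excludes association lists with duplicate keys: the argument stands for a Python dict, which cannot hold two entries with the same key.
def Pre_determine_echo_level_py (files : List (String × String)) : Prop :=
  (files.map Prod.fst).Nodup
instance (files : List (String × String)) : Decidable (Pre_determine_echo_level_py files) := by
  unfold Pre_determine_echo_level_py; infer_instance
def pvWitness_determine_echo_level_py : (List (String × String)) :=
  [("main.py", "class Snake"), ("util.py", "restart")]
def Spec_determine_echo_level_py (files : List (String × String)) (out : Int) : Prop := out = determine_echo_level_py_alt files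
instance (files : List (String × String)) (out : Int) : Decidable (Spec_determine_echo_level_py files out) := by unfold Spec_determine_echo_level_py; infer_instance

-- ===== CLAIM (what is proved, stated in full; the proofs are below) =====
def Claim_equal_determine_echo_level_py : Prop := ∀ (files : List (String × String)), Dom_determine_echo_level_py files → Pre_determine_echo_level_py files → Spec_determine_echo_level_py files (determine_echo_level_py files)

-- ===== LEMMAS AND PROOFS =====

-- one conditional-max update of A, and one pass of A, as named functions (definitionally the port's lambdas)
def stepE (k : Int) (b : String → Bool) : Int → (String × String) → Int :=
  fun e p => if b p.2 then max e k else e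
def passE (k : Int) (b : String → Bool) (fs : List (String × String)) (e : Int) : Int :=
  fs.foldl (stepE k b) e

lemma A_eq (files : List (String × String)) :
    determine_echo_level_py files =
      passE 9 echoCond9 files (passE 8 echoCond8 files (passE 7 echoCond7 files
        (passE 6 echoCond6 files (passE 5 echoCond5 files (passE 4 echoCond4 files
        (passE 3 echoCond3 files (passE 2 echoCond2 files (passE 1 echoCond1 files 0)))))))) := rfl

lemma foldl_max_comm (f : Int → (String × String) → Int)
    (h : ∀ x j p, f (max x j) p = max (f x p) j) :
    ∀ (fs : List (String × String)) (x j : Int), fs.foldl f (max x j) = max (fs.foldl f x) j := by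
  intro fs
  induction fs with
  | nil => intro x j; rfl
  | cons p fs ih => intro x j; simp only [List.foldl, h]; exact ih (f x p) j

lemma stepE_comm (k : Int) (b : String → Bool) :
    ∀ (x j : Int) (p : String × String), stepE k b (max x j) p = max (stepE k b x p) j := by
  intro x j p; unfold stepE; split_ifs <;> omega

lemma passE_cons (k : Int) (b : String → Bool) (p : String × String)
    (fs : List (String × String)) (e : Int) :
    passE k b (p :: fs) e = passE k b fs (stepE k b e p) := rfl

lemma passE_stepE (k : Int) (b : String → Bool) (k' : Int) (b' : String → Bool)
    (fs : List (String × String)) (x : Int) (p : String × String) :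
    passE k b fs (stepE k' b' x p) = stepE k' b' (passE k b fs x) p := by
  by_cases h : b' p.2
  · simp only [stepE, h, if_pos]
    exact foldl_max_comm _ (stepE_comm k b) fs x k'
  · simp only [stepE, h, Bool.false_eq_true, ite_false]

lemma bstep_comm : ∀ (x j : Int) (p : String × String),
    (max (max x j) (echoLevelOf p.2)) = max (max x (echoLevelOf p.2)) j := by
  intro x j p; omega

lemma bfold_max (fs : List (String × String)) (e j : Int) :
    fs.foldl (fun e p => max e (echoLevelOf p.2)) (max e j)
      = max (fs.foldl (fun e p => max e (echoLevelOf p.2)) e) j :=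
  foldl_max_comm _ bstep_comm fs e j

lemma le_bfold : ∀ (fs : List (String × String)) (e : Int),
    e ≤ fs.foldl (fun e p => max e (echoLevelOf p.2)) e := by
  intro fs
  induction fs with
  | nil => intro e; exact le_rfl
  | cons p fs ih =>
    intro e
    exact le_trans (le_max_left e (echoLevelOf p.2)) (ih (max e (echoLevelOf p.2)))

def stepKC : Int → (Int × Bool) → Int := fun l kc => if kc.2 then max l kc.1 else l

lemma stepKC_rcomm : ∀ (b : Int) (a1 a2 : Int × Bool), stepKC (stepKC b a1) a2 = stepKC (stepKC b a2) a1 := by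
  intro b a1 a2; unfold stepKC; split_ifs <;> omega

lemma foldl_stepKC_pull : ∀ (L : List (Int × Bool)), (∀ kc ∈ L, 0 ≤ kc.1) → ∀ X : Int, 0 ≤ X →
    L.foldl stepKC X = max X (L.foldl stepKC 0) := by
  intro L
  induction L with
  | nil => intro _ X hX; simp; omega
  | cons kc L ih =>
    intro h X hX
    have h' : ∀ a ∈ L, 0 ≤ a.1 := fun a ha => h a (by simp [ha])
    rcases kc with ⟨k, b⟩
    cases b with
    | false =>
      have e1 : stepKC X (k, false) = X := by simp [stepKC]
      have e0 : stepKC 0 (k, false) = 0 := by simp [stepKC]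
      simp only [List.foldl, e1, e0]
      exact ih h' X hX
    | true =>
      have e1 : stepKC X (k, true) = max X k := by simp [stepKC]
      have e0 : stepKC 0 (k, true) = max 0 k := by simp [stepKC]
      simp only [List.foldl, e1, e0]
      rw [ih h' (max X k) (le_trans hX (le_max_left _ _)), ih h' (max 0 k) (le_max_left _ _)]
      omega

lemma echoChecks_nonneg (code : String) : ∀ kc ∈ echoChecks code, (0:Int) ≤ kc.1 := by
  intro kc hkc
  simp [echoChecks] at hkc
  rcases hkc with rfl | rfl | rfl | rfl | rfl | rfl | rfl | rfl | rfl <;> norm_num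

lemma chain_eq (p : String × String) (X : Int) (hX : 0 ≤ X) :
    stepE 1 echoCond1 (stepE 2 echoCond2 (stepE 3 echoCond3 (stepE 4 echoCond4
      (stepE 5 echoCond5 (stepE 6 echoCond6 (stepE 7 echoCond7 (stepE 8 echoCond8
      (stepE 9 echoCond9 X p) p) p) p) p) p) p) p) p
      = max X (echoLevelOf p.2) := by
  have hrc : RightCommutative stepKC := ⟨stepKC_rcomm⟩
  have hch : stepE 1 echoCond1 (stepE 2 echoCond2 (stepE 3 echoCond3 (stepE 4 echoCond4
      (stepE 5 echoCond5 (stepE 6 echoCond6 (stepE 7 echoCond7 (stepE 8 echoCond8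
      (stepE 9 echoCond9 X p) p) p) p) p) p) p) p) p
      = (echoChecks p.2).reverse.foldl stepKC X := rfl
  rw [hch, @List.Perm.foldl_eq _ _ stepKC _ _ hrc (List.reverse_perm (echoChecks p.2)) X,
      foldl_stepKC_pull (echoChecks p.2) (echoChecks_nonneg p.2) X hX]
  rfl

lemma main_eq : ∀ (fs : List (String × String)) (e : Int), 0 ≤ e →
    passE 9 echoCond9 fs (passE 8 echoCond8 fs (passE 7 echoCond7 fs
      (passE 6 echoCond6 fs (passE 5 echoCond5 fs (passE 4 echoCond4 fs
      (passE 3 echoCond3 fs (passE 2 echoCond2 fs (passE 1 echoCond1 fs e))))))))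
      = fs.foldl (fun e p => max e (echoLevelOf p.2)) e := by
  intro fs
  induction fs with
  | nil => intro e _; rfl
  | cons p fs ih =>
    intro e he
    simp only [passE_cons, passE_stepE, List.foldl]
    rw [ih e he]
    have hX : 0 ≤ fs.foldl (fun e p => max e (echoLevelOf p.2)) e := le_trans he (le_bfold fs e)
    calc stepE 1 echoCond1 (stepE 2 echoCond2 (stepE 3 echoCond3 (stepE 4 echoCond4
          (stepE 5 echoCond5 (stepE 6 echoCond6 (stepE 7 echoCond7 (stepE 8 echoCond8
          (stepE 9 echoCond9 (fs.foldl (fun e p => max e (echoLevelOf p.2)) e) p) p) p) p) p) p) p) p) p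
        = max (fs.foldl (fun e p => max e (echoLevelOf p.2)) e) (echoLevelOf p.2) :=
          chain_eq p _ hX
      _ = fs.foldl (fun e p => max e (echoLevelOf p.2)) (max e (echoLevelOf p.2)) :=
          (bfold_max fs e (echoLevelOf p.2)).symm

-- ===== VERDICT (by name: the statement is the Claim_ definition above) =====
theorem determine_echo_level_py_spec : Claim_equal_determine_echo_level_py := by
  intro files _ _
  unfold Spec_determine_echo_level_py
  rw [A_eq]
  exact main_eq files 0 le_rfl
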